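-- pv_equiv track=rewrite | github.com/sung0503/codetree-TILs | 241007/고대 문명 유적 탐사/ancient-ruin-exploration.py | make_check_board
-- ===== SOURCE A (Python) =====
-- LOOKS = [(0, -1), (0, 1), (-1, 0), (1, 0)]
--
-- def is_wrong_coord(x, y):
--     return x < 0 or 4 < x or y < 0 or 4 < y
--
-- def make_check_board(board):
--     check_board = [[0] * 5 for i in range(5)]
--     is_unchecked = 1
--     for i in range(5):
--         for j in range(5):
--             if (check_board[i][j] == 1):
--                 for l in LOOKS:
--                     if is_wrong_coord(i + l[0], j + l[1]):
--                         continue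
--                     if (board[i + l[0]][j + l[1]] == board[i][j]):
--                         check_board[i + l[0]][j + l[1]] = 1
--             else:
--                 same = 0
--                 for l in LOOKS:
--                     if is_wrong_coord(i + l[0], j + l[1]):
--                         continue
--                     if (board[i + l[0]][j + l[1]] == board[i][j]):
--                         same += 1
--                 if same >= 2:
--                     is_unchecked = 0
--                     check_board[i][j] = 1
--                     for l in LOOKS:
--                         if is_wrong_coord(i + l[0], j + l[1]):
--                             continue
--                         if (board[i + l[0]][j + l[1]] == board[i][j]):
--                             check_board[i + l[0]][j + l[1]] = 1
--     return check_board, is_unchecked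
-- ===== SOURCE B (Python) =====
-- def make_check_board(board):
--     NB = ((0, -1), (0, 1), (-1, 0), (1, 0))
--
--     def deg(i, j):
--         v = board[i][j]
--         return sum(1 for dx, dy in NB
--                    if 0 <= i + dx < 5 and 0 <= j + dy < 5
--                    and board[i + dx][j + dy] == v)
--
--     hot = [[deg(i, j) >= 2 for j in range(5)] for i in range(5)]
--     check_board = [[1 if hot[i][j] or any(
--                         0 <= i + dx < 5 and 0 <= j + dy < 5
--                         and hot[i + dx][j + dy]
--                         and board[i + dx][j + dy] == board[i][j]
--                         for dx, dy in NB) else 0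
--                     for j in range(5)] for i in range(5)]
--     is_unchecked = 0 if any(any(r) for r in hot) else 1
--     return check_board, is_unchecked
-- ===== Notes on version B (the rewrite author's own statement) =====
-- stated objective: alternative
-- what changed: A's single row-major pass with in-pass mark propagation and re-visit spreading is replaced by a stateless local rule: precompute for every cell whether it has >=2 equal orthogonal neighbours ('hot'), then mark a cell iff it is hot or has an equal in-range neighbour that is hot, and set the flag from whether any hot cell exists.
import Mathlib
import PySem

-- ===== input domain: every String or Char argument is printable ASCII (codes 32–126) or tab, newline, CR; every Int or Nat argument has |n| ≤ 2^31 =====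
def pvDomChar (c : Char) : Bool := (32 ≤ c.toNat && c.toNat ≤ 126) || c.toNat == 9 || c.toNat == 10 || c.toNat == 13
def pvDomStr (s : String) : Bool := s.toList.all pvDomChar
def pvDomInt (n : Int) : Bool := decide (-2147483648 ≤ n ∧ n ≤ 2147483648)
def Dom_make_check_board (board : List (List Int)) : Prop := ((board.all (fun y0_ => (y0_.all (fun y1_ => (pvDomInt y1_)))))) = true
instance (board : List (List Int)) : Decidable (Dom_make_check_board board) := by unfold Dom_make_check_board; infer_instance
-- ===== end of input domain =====

-- B replaces A's stateful row-major marking pass (with in-pass propagation) by a stateless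
-- local rule: a cell is marked iff it, or an equal-valued orthogonal neighbour of it, has at
-- least two equal orthogonal neighbours; the flag records whether any such 'hot' cell exists.

-- ===== PORT A =====
def LOOKS : List (Int × Int) := [(0, -1), (0, 1), (-1, 0), (1, 0)]

def is_wrong_coord (x y : Int) : Bool :=
  decide (x < 0) || decide (4 < x) || decide (y < 0) || decide (4 < y)

-- board[x][y]; at every use the indices are provably in 0..4, where pyGetD is exact
def bget (board : List (List Int)) (x y : Int) : Int :=
  PySem.List.pyGetD (PySem.List.pyGetD board x []) y 0

-- check_board[x][y] = v; at every use the indices are in 0..4, where pySetD is exact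
def cset (cb : List (List Int)) (x y : Int) (v : Int) : List (List Int) :=
  PySem.List.pySetD cb x (PySem.List.pySetD (PySem.List.pyGetD cb x []) y v)

-- the 'for l in LOOKS: … check_board[i+l[0]][j+l[1]] = 1' marking loop of A
def spreadA (board : List (List Int)) (cb : List (List Int)) (i j : Int) : List (List Int) :=
  LOOKS.foldl (fun cb l =>
    if is_wrong_coord (i + l.1) (j + l.2) then cb
    else if bget board (i + l.1) (j + l.2) == bget board i j then cset cb (i + l.1) (j + l.2) 1
    else cb) cb

-- body of A's double loop for one cell (i, j)
def stepCell (board : List (List Int)) (st : List (List Int) × Int) (i j : Int) :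
    List (List Int) × Int :=
  let cb := st.1
  if PySem.List.pyGetD (PySem.List.pyGetD cb i []) j 0 == 1 then
    (spreadA board cb i j, st.2)
  else
    let same := LOOKS.foldl (fun same l =>
      if is_wrong_coord (i + l.1) (j + l.2) then same
      else if bget board (i + l.1) (j + l.2) == bget board i j then same + 1
      else same) (0 : Int)
    if 2 ≤ same then (spreadA board (cset cb i j 1) i j, 0)
    else (cb, st.2)

def make_check_board (board : List (List Int)) : List (List Int) × Int :=
  let init : List (List Int) × Int :=
    ((PySem.List.pyRange 0 5 1).map (fun _ => List.replicate 5 (0 : Int)), 1)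
  (PySem.List.pyRange 0 5 1).foldl (fun st i =>
    (PySem.List.pyRange 0 5 1).foldl (fun st j => stepCell board st i j) st) init

-- ===== PORT B =====
def inb (x y : Int) : Bool := decide (0 ≤ x) && decide (x < 5) && decide (0 ≤ y) && decide (y < 5)

-- deg(i, j) of Source B: number of in-range orthogonal neighbours holding the same value
def degB (board : List (List Int)) (i j : Int) : Int :=
  (LOOKS.countP (fun l => inb (i + l.1) (j + l.2) &&
      (bget board (i + l.1) (j + l.2) == bget board i j)) : Nat)

def hotB (board : List (List Int)) : List (List Bool) :=
  (PySem.List.pyRange 0 5 1).map (fun i =>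
    (PySem.List.pyRange 0 5 1).map (fun j => decide ((2 : Int) ≤ degB board i j)))

-- hot[x][y]; read only at indices in 0..4, where pyGetD is exact
def hotAt (h : List (List Bool)) (x y : Int) : Bool :=
  PySem.List.pyGetD (PySem.List.pyGetD h x []) y false

def make_check_board_alt (board : List (List Int)) : List (List Int) × Int :=
  let hot := hotB board
  let check_board := (PySem.List.pyRange 0 5 1).map (fun i =>
    (PySem.List.pyRange 0 5 1).map (fun j =>
      if hotAt hot i j || LOOKS.any (fun l =>
            inb (i + l.1) (j + l.2) && hotAt hot (i + l.1) (j + l.2) &&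
            (bget board (i + l.1) (j + l.2) == bget board i j)) then (1 : Int) else 0))
  let is_unchecked : Int := if hot.any (fun r => r.any id) then 0 else 1
  (check_board, is_unchecked)

-- ===== PRECONDITION & SPEC =====
-- A (and B) index board[0..4][0..4]; Python raises IndexError iff the board has fewer than
-- 5 rows or one of the first 5 rows has fewer than 5 entries — exactly those inputs are excluded.
def Pre_make_check_board (board : List (List Int)) : Prop :=
  5 ≤ board.length ∧ ∀ r ∈ board.take 5, 5 ≤ r.length
instance (board : List (List Int)) : Decidable (Pre_make_check_board board) := by
  unfold Pre_make_check_board; infer_instance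

def pvWitness_make_check_board : List (List Int) :=
  List.replicate 5 (List.replicate 5 0)

def Spec_make_check_board (board : List (List Int)) (out : List (List Int) × Int) : Prop :=
  out = make_check_board_alt board
instance (board : List (List Int)) (out : List (List Int) × Int) :
    Decidable (Spec_make_check_board board out) := by unfold Spec_make_check_board; infer_instance

-- ===== CLAIM (what is proved, stated in full; the proofs are below) =====
def Claim_equal_make_check_board : Prop := ∀ (board : List (List Int)), Dom_make_check_board board → Pre_make_check_board board → Spec_make_check_board board (make_check_board board)

-- ===== LEMMAS AND PROOFS =====

-- abstract view: v = bget board; everything below is about v only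
def eqn (v : Int → Int → Int) (i j x y : Int) : Bool :=
  !is_wrong_coord x y && (v x y == v i j)

def degf (v : Int → Int → Int) (i j : Int) : Nat :=
  LOOKS.countP (fun l => eqn v i j (i + l.1) (j + l.2))

def hotf (v : Int → Int → Int) (i j : Int) : Bool := decide (2 ≤ degf v i j)

-- the loop invariant: after the first k cells of the scan (scan position 5*i+j), cell (i,j)
-- is marked iff it is hot and already visited, or some equal in-range neighbour is
def Mf (v : Int → Int → Int) (k i j : Int) : Bool :=
  (decide (5 * i + j < k) && hotf v i j) ||
  LOOKS.any (fun l => eqn v i j (i + l.1) (j + l.2) &&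
    decide (5 * (i + l.1) + (j + l.2) < k) && hotf v (i + l.1) (j + l.2))

def render (m : Int → Int → Bool) : List (List Int) :=
  (PySem.List.pyRange 0 5 1).map (fun i =>
    (PySem.List.pyRange 0 5 1).map (fun j => if m i j then (1 : Int) else 0))

def allCells : List (Int × Int) :=
  (PySem.List.pyRange 0 5 1).flatMap (fun i => (PySem.List.pyRange 0 5 1).map (fun j => (i, j)))

def flagf (v : Int → Int → Int) (k : Int) : Int :=
  if allCells.any (fun c => decide (5 * c.1 + c.2 < k) && hotf v c.1 c.2) then 0 else 1

def upd (m : Int → Int → Bool) (x y : Int) : Int → Int → Bool :=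
  fun a b => (decide (a = x) && decide (b = y)) || m a b

-- which entries the marking loop of A sets to 1
def spreadCond (v : Int → Int → Int) (i j a b : Int) : Bool :=
  LOOKS.any (fun l => decide (a = i + l.1) && decide (b = j + l.2) &&
    eqn v i j (i + l.1) (j + l.2))

lemma pyRange5 : PySem.List.pyRange 0 5 1 = [0, 1, 2, 3, 4] := rfl

lemma wrong_eq_false (x y : Int) :
    is_wrong_coord x y = false ↔ 0 ≤ x ∧ x < 5 ∧ 0 ≤ y ∧ y < 5 := by
  simp [is_wrong_coord]; omega

lemma eqn_true (v : Int → Int → Int) (i j x y : Int) :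
    eqn v i j x y = true ↔ (0 ≤ x ∧ x < 5 ∧ 0 ≤ y ∧ y < 5) ∧ v x y = v i j := by
  simp only [eqn, Bool.and_eq_true, Bool.not_eq_eq_eq_not, Bool.not_true, wrong_eq_false,
    beq_iff_eq]

lemma render_congr (m1 m2 : Int → Int → Bool)
    (h : ∀ a b : Int, 0 ≤ a → a < 5 → 0 ≤ b → b < 5 → m1 a b = m2 a b) :
    render m1 = render m2 := by
  simp [render, pyRange5, h]

lemma render_get (m : Int → Int → Bool) (x y : Int)
    (hx : 0 ≤ x ∧ x < 5) (hy : 0 ≤ y ∧ y < 5) :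
    PySem.List.pyGetD (PySem.List.pyGetD (render m) x []) y (0 : Int) =
      (if m x y then (1 : Int) else 0) := by
  unfold render
  rw [PySem.List.pyGetD_map_pyRange_of_nonneg _ 5 x _ hx.1 hx.2,
      PySem.List.pyGetD_map_pyRange_of_nonneg _ 5 y _ hy.1 hy.2]

lemma cset_render (m : Int → Int → Bool) (x y : Int)
    (hx : 0 ≤ x ∧ x < 5) (hy : 0 ≤ y ∧ y < 5) :
    cset (render m) x y 1 = render (upd m x y) := by
  obtain ⟨hx0, hx5⟩ := hx; obtain ⟨hy0, hy5⟩ := hy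
  unfold cset render upd
  rw [PySem.List.pyGetD_map_pyRange_of_nonneg _ 5 x _ hx0 hx5]
  rw [PySem.List.pySetD_of_nonneg _ _ hx0, PySem.List.pySetD_of_nonneg _ _ hy0]
  interval_cases x <;> interval_cases y <;> simp [pyRange5, List.set]

lemma mem_allCells (p : Int × Int) :
    p ∈ allCells ↔ 0 ≤ p.1 ∧ p.1 < 5 ∧ 0 ≤ p.2 ∧ p.2 < 5 := by
  cases p with | mk a b =>
  simp [allCells, PySem.List.mem_pyRange_one]
  tauto

lemma looks_neg (l : Int × Int) (h : l ∈ LOOKS) : (-l.1, -l.2) ∈ LOOKS := by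
  simp [LOOKS] at h ⊢
  rcases h with h|h|h|h <;> subst h <;> norm_num

lemma two_distinct_hot (v : Int → Int → Int) (i j : Int) (l1 l2 : Int × Int)
    (h1 : l1 ∈ LOOKS) (h2 : l2 ∈ LOOKS) (hne : l1 ≠ l2)
    (e1 : eqn v i j (i + l1.1) (j + l1.2) = true)
    (e2 : eqn v i j (i + l2.1) (j + l2.2) = true) :
    2 ≤ degf v i j := by
  have : hotf v i j = true := by
    simp only [LOOKS, List.mem_cons, List.not_mem_nil, or_false] at h1 h2
    simp only [hotf, degf, LOOKS, List.countP_cons, List.countP_nil, decide_eq_true_eq]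
    rcases h1 with h1|h1|h1|h1 <;> rcases h2 with h2|h2|h2|h2 <;> subst h1 <;> subst h2 <;>
      simp_all <;> split_ifs <;> omega
  simpa [hotf] using this

lemma Mf_iff (v : Int → Int → Int) (k i j : Int) :
    Mf v k i j = true ↔
      (5 * i + j < k ∧ 2 ≤ degf v i j) ∨
      ∃ l ∈ LOOKS, (0 ≤ i + l.1 ∧ i + l.1 < 5 ∧ 0 ≤ j + l.2 ∧ j + l.2 < 5) ∧
        v (i + l.1) (j + l.2) = v i j ∧ 5 * (i + l.1) + (j + l.2) < k ∧
        2 ≤ degf v (i + l.1) (j + l.2) := by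
  simp only [Mf, hotf, eqn, Bool.or_eq_true, Bool.and_eq_true, List.any_eq_true,
    Bool.not_eq_eq_eq_not, Bool.not_true, wrong_eq_false, beq_iff_eq, decide_eq_true_eq]
  tauto

lemma spreadCond_iff (v : Int → Int → Int) (i j a b : Int) :
    spreadCond v i j a b = true ↔
      ∃ l ∈ LOOKS, a = i + l.1 ∧ b = j + l.2 ∧
        (0 ≤ a ∧ a < 5 ∧ 0 ≤ b ∧ b < 5) ∧ v a b = v i j := by
  simp only [spreadCond, eqn, Bool.and_eq_true, List.any_eq_true,
    Bool.not_eq_eq_eq_not, Bool.not_true, wrong_eq_false, beq_iff_eq, decide_eq_true_eq]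
  constructor
  · rintro ⟨l, hl, ⟨ha, hb⟩, hbd, he⟩
    subst ha; subst hb
    exact ⟨l, hl, rfl, rfl, hbd, he⟩
  · rintro ⟨l, hl, ha, hb, hbd, he⟩
    subst ha; subst hb
    exact ⟨l, hl, ⟨rfl, rfl⟩, hbd, he⟩

lemma Mf_mono (v : Int → Int → Int) (k k' i j : Int) (hk : k ≤ k')
    (h : Mf v k i j = true) : Mf v k' i j = true := by
  rw [Mf_iff] at h ⊢
  rcases h with ⟨h1, h2⟩ | ⟨l, hl, hbd, he, hlt, hh⟩
  · exact Or.inl ⟨by omega, h2⟩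
  · exact Or.inr ⟨l, hl, hbd, he, by omega, hh⟩

lemma key1 (v : Int → Int → Int) (i j : Int)
    (h : Mf v (5 * i + j) i j = true) :
    ∃ l ∈ LOOKS, (0 ≤ i + l.1 ∧ i + l.1 < 5 ∧ 0 ≤ j + l.2 ∧ j + l.2 < 5) ∧
      v (i + l.1) (j + l.2) = v i j ∧ 5 * (i + l.1) + (j + l.2) < 5 * i + j ∧
      2 ≤ degf v (i + l.1) (j + l.2) := by
  rw [Mf_iff] at h
  rcases h with ⟨h1, _⟩ | h
  · omega
  · exact h

-- marked cells have a hot equal neighbour or are hot themselves: the three pointwise laws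
lemma P1 (v : Int → Int → Int) (i j : Int)
    (hi : 0 ≤ i ∧ i < 5) (hj : 0 ≤ j ∧ j < 5)
    (hm : Mf v (5 * i + j) i j = true) (a b : Int)
    (ha0 : 0 ≤ a) (ha5 : a < 5) (hb0 : 0 ≤ b) (hb5 : b < 5) :
    (Mf v (5 * i + j) a b || spreadCond v i j a b) = Mf v (5 * i + j + 1) a b := by
  obtain ⟨l0, hl0, hbd0, he0, hlt0, hh0⟩ := key1 v i j hm
  apply Bool.coe_iff_coe.mp
  simp only [Bool.or_eq_true]
  constructor
  · rintro (h | h)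
    · exact Mf_mono v _ _ a b (by omega) h
    · rw [spreadCond_iff] at h
      obtain ⟨l, hl, ha, hb, hbd, he⟩ := h
      by_cases hle : l = l0
      · subst hle
        rw [Mf_iff]; left
        refine ⟨by omega, ?_⟩
        rw [ha, hb]; exact hh0
      · have hc : 2 ≤ degf v i j := by
          refine two_distinct_hot v i j l l0 hl hl0 hle ?_ ?_
          · rw [eqn_true]
            exact ⟨by rw [← ha, ← hb]; exact hbd, by rw [← ha, ← hb]; exact he⟩
          · rw [eqn_true]; exact ⟨hbd0, he0⟩
        rw [Mf_iff]; right
        refine ⟨(-l.1, -l.2), looks_neg l hl, ?_, ?_, ?_, ?_⟩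
        · show 0 ≤ a + -l.1 ∧ a + -l.1 < 5 ∧ 0 ≤ b + -l.2 ∧ b + -l.2 < 5
          have hx : a + -l.1 = i := by omega
          have hy : b + -l.2 = j := by omega
          rw [hx, hy]; exact ⟨hi.1, hi.2, hj.1, hj.2⟩
        · show v (a + -l.1) (b + -l.2) = v a b
          have hx : a + -l.1 = i := by omega
          have hy : b + -l.2 = j := by omega
          rw [hx, hy, he]
        · show 5 * (a + -l.1) + (b + -l.2) < 5 * i + j + 1
          omega
        · show 2 ≤ degf v (a + -l.1) (b + -l.2)
          have hx : a + -l.1 = i := by omega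
          have hy : b + -l.2 = j := by omega
          rw [hx, hy]; exact hc
  · intro h
    rw [Mf_iff] at h
    rcases h with ⟨hpos, hdeg⟩ | ⟨l, hl, hbd, he, hpos, hdeg⟩
    · by_cases hlt : 5 * a + b < 5 * i + j
      · left; rw [Mf_iff]; exact Or.inl ⟨hlt, hdeg⟩
      · have hab : a = i ∧ b = j := by omega
        obtain ⟨hA, hB⟩ := hab; subst hA; subst hB
        left; exact hm
    · by_cases hlt : 5 * (a + l.1) + (b + l.2) < 5 * i + j
      · left; rw [Mf_iff]; exact Or.inr ⟨l, hl, hbd, he, hlt, hdeg⟩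
      · have hx : a + l.1 = i := by omega
        have hy : b + l.2 = j := by omega
        right
        rw [spreadCond_iff]
        refine ⟨(-l.1, -l.2), looks_neg l hl, by show a = i + -l.1; omega,
          by show b = j + -l.2; omega, ⟨ha0, ha5, hb0, hb5⟩, ?_⟩
        rw [hx, hy] at he
        exact he.symm

lemma P2 (v : Int → Int → Int) (i j : Int)
    (hi : 0 ≤ i ∧ i < 5) (hj : 0 ≤ j ∧ j < 5)
    (hh : 2 ≤ degf v i j) (a b : Int)
    (ha0 : 0 ≤ a) (ha5 : a < 5) (hb0 : 0 ≤ b) (hb5 : b < 5) :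
    (upd (Mf v (5 * i + j)) i j a b || spreadCond v i j a b) = Mf v (5 * i + j + 1) a b := by
  apply Bool.coe_iff_coe.mp
  simp only [upd, Bool.or_eq_true, Bool.and_eq_true, decide_eq_true_eq]
  constructor
  · rintro ((⟨hA, hB⟩ | h) | h)
    · subst hA; subst hB
      rw [Mf_iff]; exact Or.inl ⟨by omega, hh⟩
    · exact Mf_mono v _ _ a b (by omega) h
    · rw [spreadCond_iff] at h
      obtain ⟨l, hl, ha, hb, hbd, he⟩ := h
      rw [Mf_iff]; right
      refine ⟨(-l.1, -l.2), looks_neg l hl, ?_, ?_, ?_, ?_⟩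
      · show 0 ≤ a + -l.1 ∧ a + -l.1 < 5 ∧ 0 ≤ b + -l.2 ∧ b + -l.2 < 5
        have hx : a + -l.1 = i := by omega
        have hy : b + -l.2 = j := by omega
        rw [hx, hy]; exact ⟨hi.1, hi.2, hj.1, hj.2⟩
      · show v (a + -l.1) (b + -l.2) = v a b
        have hx : a + -l.1 = i := by omega
        have hy : b + -l.2 = j := by omega
        rw [hx, hy, he]
      · show 5 * (a + -l.1) + (b + -l.2) < 5 * i + j + 1
        omega
      · show 2 ≤ degf v (a + -l.1) (b + -l.2)
        have hx : a + -l.1 = i := by omega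
        have hy : b + -l.2 = j := by omega
        rw [hx, hy]; exact hh
  · intro h
    rw [Mf_iff] at h
    rcases h with ⟨hpos, hdeg⟩ | ⟨l, hl, hbd, he, hpos, hdeg⟩
    · by_cases hlt : 5 * a + b < 5 * i + j
      · left; right; rw [Mf_iff]; exact Or.inl ⟨hlt, hdeg⟩
      · left; left; constructor <;> omega
    · by_cases hlt : 5 * (a + l.1) + (b + l.2) < 5 * i + j
      · left; right; rw [Mf_iff]; exact Or.inr ⟨l, hl, hbd, he, hlt, hdeg⟩
      · have hx : a + l.1 = i := by omega
        have hy : b + l.2 = j := by omega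
        right
        rw [spreadCond_iff]
        refine ⟨(-l.1, -l.2), looks_neg l hl, by show a = i + -l.1; omega,
          by show b = j + -l.2; omega, ⟨ha0, ha5, hb0, hb5⟩, ?_⟩
        rw [hx, hy] at he
        exact he.symm

lemma P3 (v : Int → Int → Int) (i j : Int)
    (hi : 0 ≤ i ∧ i < 5) (hj : 0 ≤ j ∧ j < 5)
    (hh : ¬ 2 ≤ degf v i j) (a b : Int)
    (ha0 : 0 ≤ a) (ha5 : a < 5) (hb0 : 0 ≤ b) (hb5 : b < 5) :
    Mf v (5 * i + j) a b = Mf v (5 * i + j + 1) a b := by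
  apply Bool.coe_iff_coe.mp
  constructor
  · exact Mf_mono v _ _ a b (by omega)
  · intro h
    rw [Mf_iff] at h ⊢
    rcases h with ⟨hpos, hdeg⟩ | ⟨l, hl, hbd, he, hpos, hdeg⟩
    · by_cases hlt : 5 * a + b < 5 * i + j
      · exact Or.inl ⟨hlt, hdeg⟩
      · exfalso; have : a = i ∧ b = j := by omega
        obtain ⟨hA, hB⟩ := this; subst hA; subst hB; exact hh hdeg
    · by_cases hlt : 5 * (a + l.1) + (b + l.2) < 5 * i + j
      · exact Or.inr ⟨l, hl, hbd, he, hlt, hdeg⟩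
      · exfalso
        have hx : a + l.1 = i := by omega
        have hy : b + l.2 = j := by omega
        rw [hx, hy] at hdeg
        exact hh hdeg

lemma flag_any_iff (v : Int → Int → Int) (k : Int) :
    (allCells.any (fun c => decide (5 * c.1 + c.2 < k) && hotf v c.1 c.2) = true) ↔
      ∃ c : Int × Int, (0 ≤ c.1 ∧ c.1 < 5 ∧ 0 ≤ c.2 ∧ c.2 < 5) ∧ 5 * c.1 + c.2 < k ∧
        2 ≤ degf v c.1 c.2 := by
  simp only [List.any_eq_true, mem_allCells, hotf, Bool.and_eq_true, decide_eq_true_eq]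
lemma F1 (v : Int → Int → Int) (i j : Int)
    (hi : 0 ≤ i ∧ i < 5) (hj : 0 ≤ j ∧ j < 5)
    (hm : Mf v (5 * i + j) i j = true) :
    flagf v (5 * i + j) = flagf v (5 * i + j + 1) := by
  obtain ⟨l0, hl0, hbd0, he0, hlt0, hh0⟩ := key1 v i j hm
  unfold flagf
  have : (allCells.any (fun c => decide (5 * c.1 + c.2 < 5 * i + j) && hotf v c.1 c.2) = true) ↔
      (allCells.any (fun c => decide (5 * c.1 + c.2 < 5 * i + j + 1) && hotf v c.1 c.2) = true) := by
    rw [flag_any_iff, flag_any_iff]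
    constructor
    · rintro ⟨c, hc, hp, hd⟩; exact ⟨c, hc, by omega, hd⟩
    · rintro ⟨c, hc, hp, hd⟩
      by_cases hlt : 5 * c.1 + c.2 < 5 * i + j
      · exact ⟨c, hc, hlt, hd⟩
      · exact ⟨(i + l0.1, j + l0.2), hbd0, hlt0, hh0⟩
  rw [Bool.coe_iff_coe.mp this]

lemma F2 (v : Int → Int → Int) (i j : Int)
    (hi : 0 ≤ i ∧ i < 5) (hj : 0 ≤ j ∧ j < 5)
    (hh : 2 ≤ degf v i j) :
    flagf v (5 * i + j + 1) = 0 := by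
  unfold flagf
  rw [if_pos]
  rw [flag_any_iff]
  exact ⟨(i, j), ⟨hi.1, hi.2, hj.1, hj.2⟩, by omega, hh⟩

lemma F3 (v : Int → Int → Int) (i j : Int)
    (hi : 0 ≤ i ∧ i < 5) (hj : 0 ≤ j ∧ j < 5)
    (hh : ¬ 2 ≤ degf v i j) :
    flagf v (5 * i + j) = flagf v (5 * i + j + 1) := by
  unfold flagf
  have : (allCells.any (fun c => decide (5 * c.1 + c.2 < 5 * i + j) && hotf v c.1 c.2) = true) ↔
      (allCells.any (fun c => decide (5 * c.1 + c.2 < 5 * i + j + 1) && hotf v c.1 c.2) = true) := by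
    rw [flag_any_iff, flag_any_iff]
    constructor
    · rintro ⟨c, hc, hp, hd⟩; exact ⟨c, hc, by omega, hd⟩
    · rintro ⟨c, hc, hp, hd⟩
      by_cases hlt : 5 * c.1 + c.2 < 5 * i + j
      · exact ⟨c, hc, hlt, hd⟩
      · exfalso
        have : c.1 = i ∧ c.2 = j := by omega
        obtain ⟨hA, hB⟩ := this
        rw [hA, hB] at hd
        exact hh hd
  rw [Bool.coe_iff_coe.mp this]

lemma spread_go (board : List (List Int)) (i j : Int) (ls : List (Int × Int))
    (m : Int → Int → Bool) :
    ls.foldl (fun cb l =>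
      if is_wrong_coord (i + l.1) (j + l.2) then cb
      else if bget board (i + l.1) (j + l.2) == bget board i j then
        cset cb (i + l.1) (j + l.2) 1
      else cb) (render m) =
    render (fun a b => m a b || ls.any (fun l => decide (a = i + l.1) && decide (b = j + l.2) &&
      eqn (bget board) i j (i + l.1) (j + l.2))) := by
  induction ls generalizing m with
  | nil =>
    apply render_congr
    intro a b _ _ _ _
    simp
  | cons l ls ih =>
    simp only [List.foldl_cons, List.any_cons]
    by_cases hw : is_wrong_coord (i + l.1) (j + l.2) = true
    · rw [if_pos hw, ih]
      apply render_congr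
      intro a b _ _ _ _
      have hz : eqn (bget board) i j (i + l.1) (j + l.2) = false := by
        simp [eqn, hw]
      rw [hz]
      cases m a b <;> simp
    · rw [if_neg hw]
      rw [Bool.not_eq_true, wrong_eq_false] at hw
      by_cases he : (bget board (i + l.1) (j + l.2) == bget board i j) = true
      · rw [if_pos he, cset_render _ _ _ ⟨hw.1, hw.2.1⟩ ⟨hw.2.2.1, hw.2.2.2⟩, ih]
        apply render_congr
        intro a b _ _ _ _
        have heq : eqn (bget board) i j (i + l.1) (j + l.2) = true := by
          simp only [eqn, Bool.and_eq_true, Bool.not_eq_eq_eq_not, Bool.not_true,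
            wrong_eq_false, he, and_true]
          exact hw
        rw [heq]
        simp only [upd, Bool.and_true]
        cases m a b <;> cases decide (a = i + l.1) <;> cases decide (b = j + l.2) <;> simp
      · rw [if_neg he, ih]
        apply render_congr
        intro a b _ _ _ _
        have hz : eqn (bget board) i j (i + l.1) (j + l.2) = false := by
          simp only [eqn, Bool.and_eq_false_iff]
          right
          exact (Bool.not_eq_true _).mp he
        rw [hz]
        cases m a b <;> simp

lemma spread_render (board : List (List Int)) (i j : Int) (m : Int → Int → Bool) :
    spreadA board (render m) i j =
      render (fun a b => m a b || spreadCond (bget board) i j a b) := by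
  unfold spreadA spreadCond
  exact spread_go board i j LOOKS m

lemma same_go (board : List (List Int)) (i j : Int) (ls : List (Int × Int)) (s : Int) :
    ls.foldl (fun same l =>
      if is_wrong_coord (i + l.1) (j + l.2) then same
      else if bget board (i + l.1) (j + l.2) == bget board i j then same + 1
      else same) s =
    s + (ls.countP (fun l => eqn (bget board) i j (i + l.1) (j + l.2)) : Nat) := by
  induction ls generalizing s with
  | nil => simp
  | cons l ls ih =>
    simp only [List.foldl_cons, List.countP_cons]
    by_cases hw : is_wrong_coord (i + l.1) (j + l.2) = true
    · rw [if_pos hw, ih]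
      have hz : eqn (bget board) i j (i + l.1) (j + l.2) = false := by
        simp [eqn, hw]
      rw [hz]
      simp
    · rw [if_neg hw]
      by_cases he : (bget board (i + l.1) (j + l.2) == bget board i j) = true
      · have heq : eqn (bget board) i j (i + l.1) (j + l.2) = true := by
          rw [Bool.not_eq_true, wrong_eq_false] at hw
          simp only [eqn, Bool.and_eq_true, Bool.not_eq_eq_eq_not, Bool.not_true,
            wrong_eq_false, he, and_true]
          exact hw
        rw [if_pos he, ih, heq]
        simp only [if_true]
        push_cast
        ring
      · have hz : eqn (bget board) i j (i + l.1) (j + l.2) = false := by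
          simp only [eqn, Bool.and_eq_false_iff]
          right
          exact (Bool.not_eq_true _).mp he
        rw [if_neg he, ih, hz]
        simp

lemma same_eq (board : List (List Int)) (i j : Int) :
    LOOKS.foldl (fun same l =>
      if is_wrong_coord (i + l.1) (j + l.2) then same
      else if bget board (i + l.1) (j + l.2) == bget board i j then same + 1
      else same) (0 : Int) = (degf (bget board) i j : Nat) := by
  rw [same_go]
  simp [degf]

lemma step_inv (board : List (List Int)) (i j k : Int)
    (hi : 0 ≤ i ∧ i < 5) (hj : 0 ≤ j ∧ j < 5) (hk : k = 5 * i + j) :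
    stepCell board (render (Mf (bget board) k), flagf (bget board) k) i j =
      (render (Mf (bget board) (k + 1)), flagf (bget board) (k + 1)) := by
  subst hk
  unfold stepCell
  simp only []
  rw [render_get _ _ _ hi hj]
  by_cases hm : Mf (bget board) (5 * i + j) i j = true
  · rw [if_pos hm]
    simp only [BEq.rfl, if_true]
    rw [spread_render]
    rw [Prod.mk.injEq]
    exact ⟨render_congr _ _ (fun a b ha0 ha5 hb0 hb5 => P1 (bget board) i j hi hj hm a b ha0 ha5 hb0 hb5),
      F1 (bget board) i j hi hj hm⟩
  · rw [if_neg hm]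
    simp only [show ((0 : Int) == 1) = false from rfl, Bool.false_eq_true, if_false]
    rw [same_eq]
    by_cases hh : 2 ≤ degf (bget board) i j
    · rw [if_pos (by exact_mod_cast hh)]
      rw [cset_render _ _ _ hi hj, spread_render]
      rw [Prod.mk.injEq]
      exact ⟨render_congr _ _ (fun a b ha0 ha5 hb0 hb5 => P2 (bget board) i j hi hj hh a b ha0 ha5 hb0 hb5),
        (F2 (bget board) i j hi hj hh).symm⟩
    · rw [if_neg (by exact_mod_cast hh)]
      rw [Prod.mk.injEq]
      exact ⟨render_congr _ _ (fun a b ha0 ha5 hb0 hb5 => P3 (bget board) i j hi hj hh a b ha0 ha5 hb0 hb5),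
        F3 (bget board) i j hi hj hh⟩

lemma init_render (board : List (List Int)) :
    ((PySem.List.pyRange 0 5 1).map (fun _ => List.replicate 5 (0 : Int)) : List (List Int)) =
      render (Mf (bget board) 0) := by
  have h : render (Mf (bget board) 0) = render (fun _ _ => false) := by
    apply render_congr
    intro a b ha0 ha5 hb0 hb5
    rw [Bool.eq_false_iff]
    rw [Ne, Mf_iff]
    rintro (⟨h1, _⟩ | ⟨l, hl, hbd, _, hp, _⟩) <;> omega
  rw [h]
  rfl

lemma init_flag (board : List (List Int)) : (1 : Int) = flagf (bget board) 0 := by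
  unfold flagf
  rw [if_neg]
  rw [flag_any_iff]
  rintro ⟨c, hc, hp, _⟩
  omega

lemma degB_eq (board : List (List Int)) (x y : Int) :
    degB board x y = (degf (bget board) x y : Nat) := by
  unfold degB degf
  have h : LOOKS.countP (fun l => inb (x + l.1) (y + l.2) &&
      (bget board (x + l.1) (y + l.2) == bget board x y)) =
      LOOKS.countP (fun l => eqn (bget board) x y (x + l.1) (y + l.2)) := by
    apply List.countP_congr
    intro l _
    have hb : inb (x + l.1) (y + l.2) = !is_wrong_coord (x + l.1) (y + l.2) := by
      apply Bool.coe_iff_coe.mp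
      simp [inb, is_wrong_coord]
      omega
    rw [hb]
    rfl
  rw [h]

lemma hotB_entry (board : List (List Int)) (x y : Int) :
    decide ((2 : Int) ≤ degB board x y) = hotf (bget board) x y := by
  rw [degB_eq]
  unfold hotf
  rw [decide_eq_decide]
  exact_mod_cast Iff.rfl

lemma hotAt_hotB (board : List (List Int)) (x y : Int)
    (hx : 0 ≤ x ∧ x < 5) (hy : 0 ≤ y ∧ y < 5) :
    hotAt (hotB board) x y = hotf (bget board) x y := by
  unfold hotAt hotB
  rw [PySem.List.pyGetD_map_pyRange_of_nonneg _ 5 x _ hx.1 hx.2,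
      PySem.List.pyGetD_map_pyRange_of_nonneg _ 5 y _ hy.1 hy.2]
  exact hotB_entry board x y

lemma hotf_true (v : Int → Int → Int) (x y : Int) :
    hotf v x y = true ↔ 2 ≤ degf v x y := by
  simp [hotf]

lemma alt_eq (board : List (List Int)) :
    make_check_board_alt board = (render (Mf (bget board) 25), flagf (bget board) 25) := by
  unfold make_check_board_alt
  simp only []
  rw [Prod.mk.injEq]
  constructor
  · apply render_congr
    intro a b ha0 ha5 hb0 hb5
    apply Bool.coe_iff_coe.mp
    rw [hotAt_hotB board a b ⟨ha0, ha5⟩ ⟨hb0, hb5⟩]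
    simp only [Bool.or_eq_true, List.any_eq_true, Bool.and_eq_true, hotf_true, beq_iff_eq]
    rw [Mf_iff]
    constructor
    · rintro (h | ⟨l, hl, ⟨⟨hinb, hhot⟩, heq⟩⟩)
      · exact Or.inl ⟨by omega, h⟩
      · right
        simp only [inb, Bool.and_eq_true, decide_eq_true_eq] at hinb
        obtain ⟨⟨⟨h1, h2⟩, h3⟩, h4⟩ := hinb
        rw [hotAt_hotB board _ _ ⟨h1, h2⟩ ⟨h3, h4⟩, hotf_true] at hhot
        exact ⟨l, hl, ⟨h1, h2, h3, h4⟩, heq, by omega, hhot⟩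
    · rintro (⟨_, h⟩ | ⟨l, hl, hbd, heq, _, hdeg⟩)
      · exact Or.inl h
      · right
        refine ⟨l, hl, ⟨?_, ?_⟩, heq⟩
        · simp only [inb, Bool.and_eq_true, decide_eq_true_eq]
          exact ⟨⟨⟨hbd.1, hbd.2.1⟩, hbd.2.2.1⟩, hbd.2.2.2⟩
        · rw [hotAt_hotB board _ _ ⟨hbd.1, hbd.2.1⟩ ⟨hbd.2.2.1, hbd.2.2.2⟩, hotf_true]
          exact hdeg
  · unfold flagf
    have h : ((hotB board).any fun r => r.any id) =
        (allCells.any (fun c => decide (5 * c.1 + c.2 < 25) && hotf (bget board) c.1 c.2)) := by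
      apply Bool.coe_iff_coe.mp
      rw [flag_any_iff]
      simp only [hotB, List.any_map, List.any_eq_true, PySem.List.mem_pyRange_one,
        Function.comp, id_eq]
      constructor
      · rintro ⟨x, ⟨hx0, hx5⟩, y, ⟨hy0, hy5⟩, hy⟩
        rw [hotB_entry, hotf_true] at hy
        exact ⟨(x, y), ⟨hx0, hx5, hy0, hy5⟩, by omega, hy⟩
      · rintro ⟨⟨x, y⟩, ⟨hx0, hx5, hy0, hy5⟩, _, hdeg⟩
        refine ⟨x, ⟨hx0, hx5⟩, y, ⟨hy0, hy5⟩, ?_⟩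
        rw [hotB_entry, hotf_true]
        exact hdeg
    rw [h]

-- ===== VERDICT (by name: the statement is the Claim_ definition above) =====
theorem make_check_board_spec : Claim_equal_make_check_board := by
  intro board _ _
  unfold Spec_make_check_board
  rw [alt_eq]
  unfold make_check_board
  rw [show (((PySem.List.pyRange 0 5 1).map (fun _ => List.replicate 5 (0 : Int))), (1 : Int)) =
      (render (Mf (bget board) 0), flagf (bget board) 0) from by
    rw [init_render board, init_flag board]]
  simp only [pyRange5, List.foldl_cons, List.foldl_nil]
  rw [step_inv board 0 0 0 ⟨by norm_num, by norm_num⟩ ⟨by norm_num, by norm_num⟩ (by norm_num)]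
  rw [show ((0 : Int) + 1) = 1 from by norm_num]
  rw [step_inv board 0 1 1 ⟨by norm_num, by norm_num⟩ ⟨by norm_num, by norm_num⟩ (by norm_num)]
  rw [show ((1 : Int) + 1) = 2 from by norm_num]
  rw [step_inv board 0 2 2 ⟨by norm_num, by norm_num⟩ ⟨by norm_num, by norm_num⟩ (by norm_num)]
  rw [show ((2 : Int) + 1) = 3 from by norm_num]
  rw [step_inv board 0 3 3 ⟨by norm_num, by norm_num⟩ ⟨by norm_num, by norm_num⟩ (by norm_num)]
  rw [show ((3 : Int) + 1) = 4 from by norm_num]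
  rw [step_inv board 0 4 4 ⟨by norm_num, by norm_num⟩ ⟨by norm_num, by norm_num⟩ (by norm_num)]
  rw [show ((4 : Int) + 1) = 5 from by norm_num]
  rw [step_inv board 1 0 5 ⟨by norm_num, by norm_num⟩ ⟨by norm_num, by norm_num⟩ (by norm_num)]
  rw [show ((5 : Int) + 1) = 6 from by norm_num]
  rw [step_inv board 1 1 6 ⟨by norm_num, by norm_num⟩ ⟨by norm_num, by norm_num⟩ (by norm_num)]
  rw [show ((6 : Int) + 1) = 7 from by norm_num]
  rw [step_inv board 1 2 7 ⟨by norm_num, by norm_num⟩ ⟨by norm_num, by norm_num⟩ (by norm_num)]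
  rw [show ((7 : Int) + 1) = 8 from by norm_num]
  rw [step_inv board 1 3 8 ⟨by norm_num, by norm_num⟩ ⟨by norm_num, by norm_num⟩ (by norm_num)]
  rw [show ((8 : Int) + 1) = 9 from by norm_num]
  rw [step_inv board 1 4 9 ⟨by norm_num, by norm_num⟩ ⟨by norm_num, by norm_num⟩ (by norm_num)]
  rw [show ((9 : Int) + 1) = 10 from by norm_num]
  rw [step_inv board 2 0 10 ⟨by norm_num, by norm_num⟩ ⟨by norm_num, by norm_num⟩ (by norm_num)]
  rw [show ((10 : Int) + 1) = 11 from by norm_num]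
  rw [step_inv board 2 1 11 ⟨by norm_num, by norm_num⟩ ⟨by norm_num, by norm_num⟩ (by norm_num)]
  rw [show ((11 : Int) + 1) = 12 from by norm_num]
  rw [step_inv board 2 2 12 ⟨by norm_num, by norm_num⟩ ⟨by norm_num, by norm_num⟩ (by norm_num)]
  rw [show ((12 : Int) + 1) = 13 from by norm_num]
  rw [step_inv board 2 3 13 ⟨by norm_num, by norm_num⟩ ⟨by norm_num, by norm_num⟩ (by norm_num)]
  rw [show ((13 : Int) + 1) = 14 from by norm_num]
  rw [step_inv board 2 4 14 ⟨by norm_num, by norm_num⟩ ⟨by norm_num, by norm_num⟩ (by norm_num)]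
  rw [show ((14 : Int) + 1) = 15 from by norm_num]
  rw [step_inv board 3 0 15 ⟨by norm_num, by norm_num⟩ ⟨by norm_num, by norm_num⟩ (by norm_num)]
  rw [show ((15 : Int) + 1) = 16 from by norm_num]
  rw [step_inv board 3 1 16 ⟨by norm_num, by norm_num⟩ ⟨by norm_num, by norm_num⟩ (by norm_num)]
  rw [show ((16 : Int) + 1) = 17 from by norm_num]
  rw [step_inv board 3 2 17 ⟨by norm_num, by norm_num⟩ ⟨by norm_num, by norm_num⟩ (by norm_num)]
  rw [show ((17 : Int) + 1) = 18 from by norm_num]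
  rw [step_inv board 3 3 18 ⟨by norm_num, by norm_num⟩ ⟨by norm_num, by norm_num⟩ (by norm_num)]
  rw [show ((18 : Int) + 1) = 19 from by norm_num]
  rw [step_inv board 3 4 19 ⟨by norm_num, by norm_num⟩ ⟨by norm_num, by norm_num⟩ (by norm_num)]
  rw [show ((19 : Int) + 1) = 20 from by norm_num]
  rw [step_inv board 4 0 20 ⟨by norm_num, by norm_num⟩ ⟨by norm_num, by norm_num⟩ (by norm_num)]
  rw [show ((20 : Int) + 1) = 21 from by norm_num]
  rw [step_inv board 4 1 21 ⟨by norm_num, by norm_num⟩ ⟨by norm_num, by norm_num⟩ (by norm_num)]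
  rw [show ((21 : Int) + 1) = 22 from by norm_num]
  rw [step_inv board 4 2 22 ⟨by norm_num, by norm_num⟩ ⟨by norm_num, by norm_num⟩ (by norm_num)]
  rw [show ((22 : Int) + 1) = 23 from by norm_num]
  rw [step_inv board 4 3 23 ⟨by norm_num, by norm_num⟩ ⟨by norm_num, by norm_num⟩ (by norm_num)]
  rw [show ((23 : Int) + 1) = 24 from by norm_num]
  rw [step_inv board 4 4 24 ⟨by norm_num, by norm_num⟩ ⟨by norm_num, by norm_num⟩ (by norm_num)]
  rw [show ((24 : Int) + 1) = 25 from by norm_num]
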